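-- pv_equiv track=rewrite | github.com/iglabari/ClaraFold | clarafold-training-pipeline/data_pipeline/cleaning/subunit_filter.py | find_subunits_with_positions
-- ===== SOURCE A (Python) =====
-- def find_subunits_with_positions(long_seq, sequences):
--     """
--     Find subunits inside a longer sequence, ignoring the final '1'.
--     Returns subunits and their positions.
--     """
--     subunits = {}
--     long_seq_base = long_seq[:-1]
--
--     for seq, files in sequences.items():
--         if seq != long_seq:
--             seq_base = seq[:-1]
--             if len(seq_base) < len(long_seq_base):
--                 if seq_base in long_seq_base:
--                     position = long_seq_base.find(seq_base)
--                     for file_path in files: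
--                         subunits[file_path] = position
--     return subunits
-- ===== SOURCE B (Python) =====
-- def find_subunits_with_positions(long_seq, sequences):
--     """Different algorithm: pre-index every window of the trimmed base (one sliding
--     pass per needed subunit length, first occurrence wins), then answer each
--     sequence by a single dictionary lookup instead of substring-searching."""
--     base = long_seq[:-1]
--     n = len(base)
--     lengths = set()
--     for seq in sequences:
--         if seq != long_seq:
--             l = len(seq[:-1])
--             if l < n:
--                 lengths.add(l)
--     index = {}
--     for l in sorted(lengths):
--         for i in range(n - l + 1):
--             w = base[i:i + l]
--             if w not in index:
--                 index[w] = i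
--     out = {}
--     for seq, files in sequences.items():
--         if seq != long_seq:
--             sb = seq[:-1]
--             if sb in index:
--                 pos = index[sb]
--                 for f in files:
--                     out[f] = pos
--     return out
-- ===== Notes on version B (the rewrite author's own statement) =====
-- stated objective: alternative
-- what changed: Replaces A's per-sequence substring search ('in' then find() over the long sequence for every entry) with a precomputed sliding-window index: one pass over the base per distinct needed length records the first position of every window in a hash map, and each sequence is then answered by a single dictionary lookup with no substring search at query time.
import Mathlib
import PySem

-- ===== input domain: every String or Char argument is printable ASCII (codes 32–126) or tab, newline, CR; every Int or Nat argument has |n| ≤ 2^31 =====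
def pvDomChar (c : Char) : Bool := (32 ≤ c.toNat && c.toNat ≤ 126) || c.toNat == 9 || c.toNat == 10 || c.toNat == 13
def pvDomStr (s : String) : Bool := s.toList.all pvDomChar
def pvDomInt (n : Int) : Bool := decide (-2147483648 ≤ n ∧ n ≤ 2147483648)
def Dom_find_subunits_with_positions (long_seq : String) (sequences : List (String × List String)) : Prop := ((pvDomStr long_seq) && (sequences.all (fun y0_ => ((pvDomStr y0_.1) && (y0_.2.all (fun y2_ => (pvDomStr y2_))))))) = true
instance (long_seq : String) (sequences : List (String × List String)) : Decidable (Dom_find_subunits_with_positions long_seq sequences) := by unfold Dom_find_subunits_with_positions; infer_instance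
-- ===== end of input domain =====

-- B replaces A's per-sequence substring search with a precomputed sliding-window index of the
-- trimmed base (one pass per needed length, first position wins); each sequence is then answered
-- by a single dictionary lookup (alternative algorithm, same results).


-- ===== PORT A =====
-- loop body of A (one item of sequences.items(); seq_base = p.1[:-1] written out at each use)
def pvStepA (long_seq long_seq_base : String) (subunits : PySem.Dict String Int)
    (p : String × List String) : PySem.Dict String Int :=
  if p.1 ≠ long_seq then
    if PySem.Str.len (PySem.Str.slice p.1 none (some (-1))) < PySem.Str.len long_seq_base then
      if PySem.Str.isIn (PySem.Str.slice p.1 none (some (-1))) long_seq_base then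
        p.2.foldl
          (fun d f => d.insert f
            (PySem.Str.find long_seq_base (PySem.Str.slice p.1 none (some (-1))))) subunits
      else subunits
    else subunits
  else subunits

def find_subunits_with_positions (long_seq : String) (sequences : List (String × List String)) : List (String × Int) :=
  (sequences.foldl (pvStepA long_seq (PySem.Str.slice long_seq none (some (-1)))) PySem.Dict.empty).items

-- ===== PORT B =====
-- first loop of B: collect the set of needed base lengths (l = len(seq[:-1]) < n)
def pvLenStep (long_seq : String) (n : Int) (ls : PySem.Set Int) (p : String × List String) : PySem.Set Int :=
  if p.1 ≠ long_seq then
    if PySem.Str.len (PySem.Str.slice p.1 none (some (-1))) < n then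
      PySem.Set.add ls (PySem.Str.len (PySem.Str.slice p.1 none (some (-1))))
    else ls
  else ls

-- inner loop body of the index build: setdefault(base[i:i+l], i)
def pvInsStep (base : String) (l : Int) (d : PySem.Dict String Int) (i : Int) : PySem.Dict String Int :=
  if d.contains (PySem.Str.slice base (some i) (some (i + l))) then d
  else d.insert (PySem.Str.slice base (some i) (some (i + l))) i

-- one sliding pass of the index build: for i in range(n - l + 1)
def pvIndexPass (base : String) (n : Int) (d : PySem.Dict String Int) (l : Int) : PySem.Dict String Int :=
  (PySem.List.pyRange 0 (n - l + 1) 1).foldl (pvInsStep base l) d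

-- final loop of B: answer each sequence by a dictionary lookup in the window index
def pvOutStep (long_seq : String) (index : PySem.Dict String Int)
    (out : PySem.Dict String Int) (p : String × List String) : PySem.Dict String Int :=
  if p.1 ≠ long_seq then
    match index.get? (PySem.Str.slice p.1 none (some (-1))) with
    | some pos => p.2.foldl (fun d f => d.insert f pos) out
    | none => out
  else out

def find_subunits_with_positions_alt (long_seq : String) (sequences : List (String × List String)) : List (String × Int) :=
  (sequences.foldl
    (pvOutStep long_seq
      ((PySem.List.sorted
          (sequences.foldl
            (pvLenStep long_seq (PySem.Str.len (PySem.Str.slice long_seq none (some (-1)))))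
            PySem.Set.empty)
          (fun x => x) false).foldl
        (pvIndexPass (PySem.Str.slice long_seq none (some (-1)))
          (PySem.Str.len (PySem.Str.slice long_seq none (some (-1)))))
        PySem.Dict.empty))
    PySem.Dict.empty).items

-- ===== PRECONDITION & SPEC =====
def Spec_find_subunits_with_positions (long_seq : String) (sequences : List (String × List String)) (out : List (String × Int)) : Prop := out = find_subunits_with_positions_alt long_seq sequences
instance (long_seq : String) (sequences : List (String × List String)) (out : List (String × Int)) : Decidable (Spec_find_subunits_with_positions long_seq sequences out) := by unfold Spec_find_subunits_with_positions; infer_instance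

-- ===== CLAIM (what is proved, stated in full; the proofs are below) =====
def Claim_equal_find_subunits_with_positions : Prop := ∀ (long_seq : String) (sequences : List (String × List String)), Dom_find_subunits_with_positions long_seq sequences → Spec_find_subunits_with_positions long_seq sequences (find_subunits_with_positions long_seq sequences)

-- ===== LEMMAS AND PROOFS =====

-- first position of a window of base equal to sb among starts 0..j-1
def pvFirstWin (base : String) (l : Int) (j : Nat) (sb : String) : Option Int :=
  ((List.range j).find?
    (fun i : Nat => PySem.Str.slice base (some (i : Int)) (some ((i : Int) + l)) == sb)).map
    (fun i : Nat => (i : Int))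

theorem pvStrLen_eq (s : String) : PySem.Str.len s = (s.toList.length : Int) := by
  simp [pysem]

theorem pvSliceToList (base : String) (i l : Int) (h0 : 0 ≤ i) (hl : 0 ≤ l) :
    (PySem.Str.slice base (some i) (some (i + l))).toList
      = (base.toList.drop i.toNat).take l.toNat := by
  simp only [PySem.Str.toList_slice, PySem.Chars.slice_eq_listSlice]
  rw [PySem.List.slice_toNat base.toList h0 (by omega)]
  congr 1
  omega

theorem pvWinLen (base : String) (i l : Int) (h0 : 0 ≤ i) (hl : 0 ≤ l)
    (hle : i + l ≤ PySem.Str.len base) :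
    (PySem.Str.slice base (some i) (some (i + l))).toList.length = l.toNat := by
  rw [pvSliceToList base i l h0 hl]
  have hn := pvStrLen_eq base
  simp only [List.length_take, List.length_drop]
  omega

-- the setdefault pass never touches keys of a length other than l
theorem pvPass_other (base : String) (l : Int) (hl0 : 0 ≤ l) :
    ∀ (k : Nat) (j : Int) (D : PySem.Dict String Int), 0 ≤ j →
      PySem.Str.len base - l + 1 ≤ j + k →
      ∀ sb : String, sb.toList.length ≠ l.toNat →
      ((PySem.List.pyRange j (PySem.Str.len base - l + 1) 1).foldl (pvInsStep base l) D).get? sb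
        = D.get? sb := by
  intro k
  induction k with
  | zero =>
    intro j D hj hb sb hsb
    rw [PySem.List.pyRange_one_eq_nil (by omega)]
    rfl
  | succ k ih =>
    intro j D hj hb sb hsb
    by_cases hend : PySem.Str.len base - l + 1 ≤ j
    · rw [PySem.List.pyRange_one_eq_nil hend]; rfl
    · rw [PySem.List.pyRange_one_cons (by omega), List.foldl_cons]
      rw [ih (j + 1) _ (by omega) (by omega) sb hsb]
      unfold pvInsStep
      split
      · rfl
      · refine PySem.Dict.get?_insert_of_ne _ _ ?_
        intro hcontr
        apply hsb
        rw [hcontr]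
        exact pvWinLen base j l hj hl0 (by omega)

-- unfolding step of pvFirstWin
theorem pvFirstWin_succ (base : String) (l : Int) (m : Nat) (sb : String) :
    pvFirstWin base l (m + 1) sb =
      match pvFirstWin base l m sb with
      | some i => some i
      | none =>
          if PySem.Str.slice base (some (m : Int)) (some ((m : Int) + l)) == sb
          then some (m : Int) else none := by
  unfold pvFirstWin
  rw [List.range_succ, List.find?_append]
  cases h : (List.range m).find?
      (fun i : Nat => PySem.Str.slice base (some (i : Int)) (some ((i : Int) + l)) == sb) with
  | some i => simp
  | none =>
    simp only [Option.none_or, Option.map_none]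
    simp only [List.find?]
    split <;> simp_all

-- the setdefault pass records the first window position for every key of length l
theorem pvPass_len (base : String) (l : Int) (_hl0 : 0 ≤ l) :
    ∀ (k : Nat) (j : Int) (D : PySem.Dict String Int), 0 ≤ j →
      j ≤ PySem.Str.len base - l + 1 →
      PySem.Str.len base - l + 1 ≤ j + k →
      (∀ sb : String, sb.toList.length = l.toNat → D.get? sb = pvFirstWin base l j.toNat sb) →
      ∀ sb : String, sb.toList.length = l.toNat →
      ((PySem.List.pyRange j (PySem.Str.len base - l + 1) 1).foldl (pvInsStep base l) D).get? sb
        = pvFirstWin base l (PySem.Str.len base - l + 1).toNat sb := by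
  intro k
  induction k with
  | zero =>
    intro j D hj hjle hb hD sb hsb
    have hjeq : j = PySem.Str.len base - l + 1 := by omega
    rw [PySem.List.pyRange_one_eq_nil (by omega)]
    simpa [hjeq] using hD sb hsb
  | succ k ih =>
    intro j D hj hjle hb hD sb hsb
    by_cases hend : PySem.Str.len base - l + 1 ≤ j
    · have hjeq : j = PySem.Str.len base - l + 1 := by omega
      rw [PySem.List.pyRange_one_eq_nil hend]
      simpa [hjeq] using hD sb hsb
    · rw [PySem.List.pyRange_one_cons (by omega), List.foldl_cons]
      refine ih (j + 1) _ (by omega) (by omega) (by omega) ?_ sb hsb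
      intro sb' hsb'
      have hcast : ((j.toNat : Int)) = j := Int.toNat_of_nonneg hj
      have hsucc : (j + 1).toNat = j.toNat + 1 := by omega
      rw [hsucc, pvFirstWin_succ, hcast]
      unfold pvInsStep
      by_cases hbw : PySem.Str.slice base (some j) (some (j + l)) = sb'
      · -- sb' is exactly the window at j
        cases hfw : pvFirstWin base l j.toNat sb' with
        | none =>
          have hnone : D.get? sb' = none := by rw [hD sb' hsb', hfw]
          have hcont : D.contains (PySem.Str.slice base (some j) (some (j + l))) = false := by
            rw [PySem.Dict.contains_eq_isSome_get?, hbw, hnone]; rfl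
          rw [if_neg (by simp [hcont]), hbw, PySem.Dict.get?_insert_self]
          simp
        | some i =>
          have hsome : D.get? sb' = some i := by rw [hD sb' hsb', hfw]
          have hcont : D.contains (PySem.Str.slice base (some j) (some (j + l))) = true := by
            rw [PySem.Dict.contains_eq_isSome_get?, hbw, hsome]; rfl
          rw [if_pos (by simp [hcont]), hsome]
      · -- sb' differs from the window at j: nothing changes for it
        have hget : (pvInsStep base l D j).get? sb' = D.get? sb' := by
          unfold pvInsStep
          split
          · rfl
          · exact PySem.Dict.get?_insert_of_ne _ _ (fun h => hbw h.symm)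
        unfold pvInsStep at hget
        rw [hget, hD sb' hsb']
        cases hfw : pvFirstWin base l j.toNat sb' with
        | some i => rfl
        | none =>
          have hbeq : (PySem.Str.slice base (some j) (some (j + l)) == sb') = false :=
            beq_eq_false_iff_ne.mpr hbw
          simp only [hbeq, Bool.false_eq_true, if_false]

-- a generic fact: find? over a range finds the stated least witness
theorem pvFindRange_some (p : Nat → Bool) :
    ∀ (m k : Nat), k < m → p k = true → (∀ j < k, p j = false) →
      (List.range m).find? p = some k := by
  intro m
  induction m with
  | zero => intro k hk; omega
  | succ m ih =>
    intro k hk hp hmin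
    rw [List.range_succ, List.find?_append]
    by_cases hkm : k < m
    · rw [ih k hkm hp hmin]; rfl
    · have hkm' : k = m := by omega
      have hnone : (List.range m).find? p = none :=
        List.find?_eq_none.2 (by
          intro x hx
          have hx' := hmin x (by have := List.mem_range.mp hx; omega)
          simp [hx'])
      rw [hnone]
      have hpm : p m = true := by rwa [hkm'] at hp
      simp [List.find?, hpm, hkm']

-- window-at-i equality is exactly "sb is a prefix of base from i"
theorem pvWinPred (base sb : String) (l : Int) (hl0 : 0 ≤ l)
    (hsb : sb.toList.length = l.toNat) (i : Nat) :
    (PySem.Str.slice base (some (i : Int)) (some ((i : Int) + l)) == sb) = true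
      ↔ sb.toList <+: base.toList.drop i := by
  rw [beq_iff_eq, ← String.toList_inj]
  rw [pvSliceToList base i l (by omega) hl0]
  rw [List.prefix_iff_eq_take, hsb]
  simp only [Int.toNat_natCast]
  constructor <;> (intro h; exact h.symm)

-- the complete pass result equals A's in/find answer
theorem pvFirstWin_eq (base sb : String) (l : Int) (hl0 : 0 ≤ l)
    (hln : l < PySem.Str.len base) (hsb : sb.toList.length = l.toNat) :
    pvFirstWin base l (PySem.Str.len base - l + 1).toNat sb
      = if PySem.Str.isIn sb base = true then some (PySem.Str.find base sb) else none := by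
  have hn := pvStrLen_eq base
  have hfind : PySem.Str.find base sb = PySem.Chars.find base.toList sb.toList := by
    simp [pysem]
  by_cases hin : PySem.Str.isIn sb base = true
  · rw [if_pos hin]
    have hinf : sb.toList <:+: base.toList := (PySem.Str.isIn_iff_infix sb base).1 hin
    have hpos : 0 ≤ PySem.Chars.find base.toList sb.toList := by
      rw [PySem.Chars.find_nonneg_iff]; exact hinf
    obtain ⟨hpre, hmin⟩ := PySem.Chars.find_spec hpos
    set fN := (PySem.Chars.find base.toList sb.toList).toNat with hfN
    have hcast : ((fN : Int)) = PySem.Chars.find base.toList sb.toList :=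
      Int.toNat_of_nonneg hpos
    have hlen2 : l.toNat ≤ base.toList.length - fN := by
      have := hpre.length_le
      simp only [List.length_drop] at this
      omega
    have hpos2 : (((PySem.Str.len base - l + 1).toNat : Int)) = PySem.Str.len base - l + 1 :=
      Int.toNat_of_nonneg (by omega)
    have hfle : PySem.Chars.find base.toList sb.toList ≤ (base.toList.length : Int) := by
      have := PySem.Chars.find_le_length (s := base.toList) (sub := sb.toList)
      simpa using this
    have hflt : fN < (PySem.Str.len base - l + 1).toNat := by omega
    unfold pvFirstWin
    rw [pvFindRange_some _ _ fN hflt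
      ((pvWinPred base sb l hl0 hsb fN).2 hpre)
      (by
        intro j hj
        by_contra hcontr
        refine hmin j hj ((pvWinPred base sb l hl0 hsb j).1 ?_)
        revert hcontr
        cases (PySem.Str.slice base (some (j : Int)) (some ((j : Int) + l)) == sb) <;> simp)]
    rw [Option.map_some, hfind, ← hcast]
  · rw [if_neg hin]
    have hno : ∀ j : Nat, ¬ sb.toList <+: base.toList.drop j := by
      intro j hpre
      have hchars : PySem.Chars.isIn sb.toList base.toList = true :=
        (PySem.Chars.exists_prefix_drop_iff_isIn sb.toList base.toList).1 ⟨j, hpre⟩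
      have hinf : sb.toList <:+: base.toList :=
        (PySem.Chars.isIn_iff_infix sb.toList base.toList).1 hchars
      exact hin ((PySem.Str.isIn_iff_infix sb base).2 hinf)
    unfold pvFirstWin
    rw [List.find?_eq_none.2 (by
      intro x _ hp
      exact hno x ((pvWinPred base sb l hl0 hsb x).1 hp))]
    rfl

-- what the index dictionary contains after processing the lengths in P
def pvIdxSpec (base : String) (P : List Int) (D : PySem.Dict String Int) : Prop :=
  ∀ sb : String,
    D.get? sb =
      if ((sb.toList.length : Int) ∈ P ∧ PySem.Str.isIn sb base = true)
      then some (PySem.Str.find base sb) else none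

theorem pvPass_spec (base : String) (l : Int) (P : List Int) (D : PySem.Dict String Int)
    (hl0 : 0 ≤ l) (hln : l < PySem.Str.len base)
    (hP : pvIdxSpec base P D) (hlP : l ∉ P) :
    pvIdxSpec base (P ++ [l]) (pvIndexPass base (PySem.Str.len base) D l) := by
  intro sb
  by_cases hlen : sb.toList.length = l.toNat
  · -- length-l keys: the pass writes exactly the first-window positions
    have hD0 : ∀ sb' : String, sb'.toList.length = l.toNat →
        D.get? sb' = pvFirstWin base l (0 : Int).toNat sb' := by
      intro sb' hsb'
      rw [hP sb']
      rw [if_neg (by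
        rintro ⟨hmem, _⟩
        exact hlP (by
          have : (sb'.toList.length : Int) = l := by omega
          rwa [this] at hmem))]
      rfl
    unfold pvIndexPass
    rw [pvPass_len base l hl0 (PySem.Str.len base - l + 1).toNat 0 D le_rfl (by omega)
      (by omega) hD0 sb hlen]
    rw [pvFirstWin_eq base sb l hl0 hln hlen]
    have hmem : ((sb.toList.length : Int) ∈ P ++ [l]) := by
      refine List.mem_append.2 (Or.inr ?_)
      refine List.mem_singleton.2 ?_
      omega
    by_cases hin : PySem.Str.isIn sb base = true
    · rw [if_pos hin, if_pos ⟨hmem, hin⟩]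
    · rw [if_neg hin, if_neg (fun hc => hin hc.2)]
  · -- other keys untouched; membership in P ++ [l] reduces to membership in P
    unfold pvIndexPass
    rw [pvPass_other base l hl0 (PySem.Str.len base - l + 1).toNat 0 D le_rfl (by omega) sb hlen]
    rw [hP sb]
    by_cases hmem : (sb.toList.length : Int) ∈ P
    · by_cases hin : PySem.Str.isIn sb base = true
      · rw [if_pos ⟨hmem, hin⟩, if_pos ⟨List.mem_append.2 (Or.inl hmem), hin⟩]
      · rw [if_neg (fun hc => hin hc.2), if_neg (fun hc => hin hc.2)]
    · rw [if_neg (fun hc => hmem hc.1), if_neg (by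
        rintro ⟨hc, _⟩
        rcases List.mem_append.1 hc with h | h
        · exact hmem h
        · exact hlen (by
            have : (sb.toList.length : Int) = l := List.mem_singleton.1 h
            omega))]

theorem pvIdx_fold (base : String) :
    ∀ (LS P : List Int) (D : PySem.Dict String Int), pvIdxSpec base P D →
      (∀ l ∈ LS, 0 ≤ l ∧ l < PySem.Str.len base) → LS.Nodup → (∀ l ∈ LS, l ∉ P) →
      pvIdxSpec base (P ++ LS) (LS.foldl (pvIndexPass base (PySem.Str.len base)) D) := by
  intro LS
  induction LS with
  | nil => intro P D hP _ _ _; simpa using hP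
  | cons l t ih =>
    intro P D hP hb hnd hfr
    rw [List.foldl_cons]
    have hstep := pvPass_spec base l P D (hb l (List.mem_cons_self)).1
      (hb l (List.mem_cons_self)).2 hP (hfr l (List.mem_cons_self))
    have := ih (P ++ [l]) _ hstep
      (fun l' hl' => hb l' (List.mem_cons_of_mem _ hl'))
      hnd.of_cons
      (by
        intro l' hl'
        simp only [List.mem_append, List.mem_singleton]
        rintro (h | h)
        · exact hfr l' (List.mem_cons_of_mem _ hl') h
        · exact (List.nodup_cons.1 hnd).1 (h ▸ hl'))
    simpa [List.append_assoc] using this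

-- facts about the collected length set
theorem pvLen_bounds (long_seq : String) (n : Int) :
    ∀ (seqs : List (String × List String)) (s : PySem.Set Int),
      (∀ l ∈ s, 0 ≤ l ∧ l < n) →
      ∀ l ∈ seqs.foldl (pvLenStep long_seq n) s, 0 ≤ l ∧ l < n := by
  intro seqs
  induction seqs with
  | nil => intro s hs; simpa using hs
  | cons q t ih =>
    intro s hs
    rw [List.foldl_cons]
    refine ih _ ?_
    intro l hl
    unfold pvLenStep at hl
    split at hl
    · split at hl
      · rcases (PySem.Set.mem_add _ _ _).1 hl with h | h
        · exact hs l h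
        · subst h
          constructor
          · rw [pvStrLen_eq]; positivity
          · assumption
      · exact hs l hl
    · exact hs l hl

theorem pvLen_nodup (long_seq : String) (n : Int) :
    ∀ (seqs : List (String × List String)) (s : PySem.Set Int),
      s.Nodup → (seqs.foldl (pvLenStep long_seq n) s).Nodup := by
  intro seqs
  induction seqs with
  | nil => intro s hs; simpa using hs
  | cons q t ih =>
    intro s hs
    rw [List.foldl_cons]
    refine ih _ ?_
    unfold pvLenStep
    split
    · split
      · exact PySem.Set.nodup_add _ _ hs
      · exact hs
    · exact hs

theorem pvLen_mono (long_seq : String) (n : Int) :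
    ∀ (seqs : List (String × List String)) (s : PySem.Set Int) (l : Int),
      l ∈ s → l ∈ seqs.foldl (pvLenStep long_seq n) s := by
  intro seqs
  induction seqs with
  | nil => intro s l h; simpa using h
  | cons q t ih =>
    intro s l h
    rw [List.foldl_cons]
    refine ih _ l ?_
    unfold pvLenStep
    split
    · split
      · exact (PySem.Set.mem_add _ _ _).2 (Or.inl h)
      · exact h
    · exact h

theorem pvLen_mem (long_seq : String) (n : Int) :
    ∀ (seqs : List (String × List String)) (s : PySem.Set Int),
      ∀ p ∈ seqs, p.1 ≠ long_seq →
      PySem.Str.len (PySem.Str.slice p.1 none (some (-1))) < n →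
      PySem.Str.len (PySem.Str.slice p.1 none (some (-1)))
        ∈ seqs.foldl (pvLenStep long_seq n) s := by
  intro seqs
  induction seqs with
  | nil => intro s p hp; simp at hp
  | cons q t ih =>
    intro s p hp hne hlt
    rw [List.foldl_cons]
    rcases List.mem_cons.1 hp with h | h
    · subst h
      refine pvLen_mono long_seq n t _ _ ?_
      unfold pvLenStep
      rw [if_pos hne, if_pos hlt]
      exact (PySem.Set.mem_add _ _ _).2 (Or.inr rfl)
    · exact ih _ p h hne hlt

-- ===== VERDICT (by name: the statement is the Claim_ definition above) =====
set_option maxHeartbeats 1000000 in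
theorem find_subunits_with_positions_spec : Claim_equal_find_subunits_with_positions := by
  intro long_seq sequences _
  unfold Spec_find_subunits_with_positions find_subunits_with_positions
    find_subunits_with_positions_alt
  congr 1
  set base := PySem.Str.slice long_seq none (some (-1)) with hbase
  set lengths := sequences.foldl (pvLenStep long_seq (PySem.Str.len base)) PySem.Set.empty
    with hlengths
  set LS := PySem.List.sorted lengths (fun x => x) false with hLS
  set idx := LS.foldl (pvIndexPass base (PySem.Str.len base)) PySem.Dict.empty with hidx
  have hinit0 : ∀ l ∈ (PySem.Set.empty : PySem.Set Int), 0 ≤ l ∧ l < PySem.Str.len base := by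
    intro l hl
    exact absurd hl (List.not_mem_nil)
  have hempty : pvIdxSpec base [] PySem.Dict.empty := by
    intro sb
    rw [PySem.Dict.get?_empty]
    rw [if_neg (by rintro ⟨h, _⟩; exact List.not_mem_nil h)]
  have hLSmem : ∀ l : Int, l ∈ LS ↔ l ∈ lengths := by
    intro l; rw [hLS, PySem.List.mem_sorted]
  have hbounds : ∀ l ∈ LS, 0 ≤ l ∧ l < PySem.Str.len base := by
    intro l hl
    exact pvLen_bounds long_seq (PySem.Str.len base) sequences PySem.Set.empty
      hinit0 l ((hLSmem l).1 hl)
  have hnd : LS.Nodup := by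
    rw [hLS]
    exact (PySem.List.sorted_perm lengths (fun x => x) false).nodup_iff.2
      (pvLen_nodup long_seq (PySem.Str.len base) sequences PySem.Set.empty List.nodup_nil)
  have hspec : pvIdxSpec base LS idx := by
    have := pvIdx_fold base LS [] PySem.Dict.empty hempty hbounds hnd
      (fun l _ => List.not_mem_nil)
    rw [hidx]
    simpa using this
  refine PySem.List.foldl_congr_mem sequences _ _ _ ?_
  intro acc p hp
  unfold pvStepA pvOutStep
  by_cases hpe : p.1 = long_seq
  · rw [if_neg (by simpa using hpe), if_neg (by simpa using hpe)]
  · rw [if_pos hpe, if_pos hpe]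
    set sb := PySem.Str.slice p.1 none (some (-1)) with hsb
    have hsblen : PySem.Str.len sb = (sb.toList.length : Int) := pvStrLen_eq sb
    have hget := hspec sb
    by_cases hlt : PySem.Str.len sb < PySem.Str.len base
    · have hmem : (sb.toList.length : Int) ∈ LS := by
        rw [hLSmem, ← hsblen]
        exact pvLen_mem long_seq (PySem.Str.len base) sequences PySem.Set.empty p hp hpe hlt
      rw [if_pos hlt]
      by_cases hin : PySem.Str.isIn sb base = true
      · rw [if_pos hin]
        rw [if_pos ⟨hmem, hin⟩] at hget
        rw [hget]
      · rw [if_neg hin]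
        rw [if_neg (fun hc => hin hc.2)] at hget
        rw [hget]
    · rw [if_neg hlt]
      rw [if_neg (by
        rintro ⟨hmem, _⟩
        exact hlt (by rw [hsblen]; exact (hbounds _ hmem).2))] at hget
      rw [hget]
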